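-- pv_equiv track=rewrite | github.com/AshCodeCraft/LeetCode_solution | Remove colored pieces if both neighbours are same coloured/game_winner.py | aliceWins
-- ===== SOURCE A (Python) =====
-- def aliceWins(colors):
--     alice_turn = True
--     color_list = list(colors)
--
--     while True:
--         valid_move = False
--         for i in range(1, len(color_list) - 1):
--             if (alice_turn and color_list[i] == 'A' and color_list[i - 1] == 'A' and color_list[i + 1] == 'A') or \
--                (not alice_turn and color_list[i] == 'B' and color_list[i - 1] == 'B' and color_list[i + 1] == 'B'):
--                 color_list.pop(i)
--                 valid_move = True
--                 alice_turn = not alice_turn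
--                 break
--
--         if not valid_move:
--             break
--
--     return not alice_turn
-- ===== SOURCE B (Python) =====
-- def aliceWins(colors):
--     a = b = 0
--     for x, y, z in zip(colors, colors[1:], colors[2:]):
--         if x == y == z:
--             if x == 'A':
--                 a += 1
--             elif x == 'B':
--                 b += 1
--     return a > b
-- ===== Notes on version B (the rewrite author's own statement) =====
-- stated objective: simpler
-- what changed: Replaced the repeated whole-list rescanning-and-popping simulation with a single pass that counts removable positions (windows of three equal pieces) per colour and compares the counts.
import Mathlib
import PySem

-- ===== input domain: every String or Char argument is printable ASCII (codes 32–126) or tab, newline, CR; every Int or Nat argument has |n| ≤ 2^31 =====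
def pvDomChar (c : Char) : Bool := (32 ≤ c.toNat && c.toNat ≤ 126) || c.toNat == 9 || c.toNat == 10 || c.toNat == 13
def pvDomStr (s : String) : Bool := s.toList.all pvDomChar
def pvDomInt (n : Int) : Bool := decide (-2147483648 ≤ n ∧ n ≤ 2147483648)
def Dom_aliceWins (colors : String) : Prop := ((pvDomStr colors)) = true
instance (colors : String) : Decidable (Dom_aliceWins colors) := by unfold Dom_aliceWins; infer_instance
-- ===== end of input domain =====

-- B replaces A's repeated rescanning-and-popping simulation by one pass counting removable windows per colour and comparing the counts (simpler).


-- ===== PORT A =====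
-- A's inner for-loop: scan i = 1 .. len-2 for the first position whose piece and both
-- neighbours equal c, and pop it; rendered as the obvious structural recursion over the list.
def aliceWinsStep (c : Char) : List Char → Option (List Char)
  | x :: y :: z :: r =>
    if x = c ∧ y = c ∧ z = c then some (x :: z :: r)
    else (aliceWinsStep c (y :: z :: r)).map (x :: ·)
  | _ => none

theorem aliceWinsStep_length {c : Char} : ∀ {l l' : List Char},
    aliceWinsStep c l = some l' → l'.length < l.length := by
  intro l
  induction l with
  | nil => intro l' h; simp [aliceWinsStep] at h
  | cons x t ih =>
    intro l' h
    match t, h with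
    | y :: z :: r, h =>
      simp only [aliceWinsStep] at h
      split at h
      · cases h; simp
      · simp only [Option.map_eq_some_iff] at h
        obtain ⟨m, hm, rfl⟩ := h
        have := ih hm
        simpa using Nat.succ_lt_succ this

-- A's outer while-True loop: keep making the first valid move for the player to move,
-- flipping the turn; when no move exists return (not alice_turn).
def aliceWinsRun (turn : Bool) (l : List Char) : Bool :=
  match h : aliceWinsStep (if turn then 'A' else 'B') l with
  | some l' => aliceWinsRun (!turn) l'
  | none => !turn
termination_by l.length
decreasing_by exact aliceWinsStep_length h

def aliceWins (colors : String) : Bool :=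
  aliceWinsRun true colors.toList

-- ===== PORT B =====
-- Source B's single zip-of-three pass, accumulating the two counters (a, b).
def aliceWinsCnt2 : List Char → Nat × Nat
  | x :: y :: z :: r =>
    let p := aliceWinsCnt2 (y :: z :: r)
    if x = y ∧ y = z then
      if x = 'A' then (p.1 + 1, p.2)
      else if x = 'B' then (p.1, p.2 + 1)
      else p
    else p
  | _ => (0, 0)

def aliceWins_alt (colors : String) : Bool :=
  decide ((aliceWinsCnt2 colors.toList).1 > (aliceWinsCnt2 colors.toList).2)

-- ===== PRECONDITION & SPEC =====
def Spec_aliceWins (colors : String) (out : Bool) : Prop := out = aliceWins_alt colors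
instance (colors : String) (out : Bool) : Decidable (Spec_aliceWins colors out) := by unfold Spec_aliceWins; infer_instance

-- ===== CLAIM (what is proved, stated in full; the proofs are below) =====
def Claim_equal_aliceWins : Prop := ∀ (colors : String), Dom_aliceWins colors → Spec_aliceWins colors (aliceWins colors)

-- ===== LEMMAS AND PROOFS =====

-- When no move exists for colour c, the corresponding counter is 0.
theorem cnt2_fst_of_none : ∀ {l : List Char}, aliceWinsStep 'A' l = none →
    (aliceWinsCnt2 l).1 = 0 := by
  intro l
  induction l with
  | nil => intro _; simp [aliceWinsCnt2]
  | cons x t ih =>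
    cases t with
    | nil => intro _; simp [aliceWinsCnt2]
    | cons y t2 =>
      cases t2 with
      | nil => intro _; simp [aliceWinsCnt2]
      | cons z r =>
        intro h
        simp only [aliceWinsStep] at h
        split at h
        · exact absurd h (by simp)
        · rename_i hcond
          simp only [Option.map_eq_none_iff] at h
          have hrec := ih h
          simp only [aliceWinsCnt2]
          split
          · rename_i hxy
            obtain ⟨h1, h2⟩ := hxy
            split
            · rename_i hx
              exact absurd ⟨hx, h1 ▸ hx, h2 ▸ h1 ▸ hx⟩ hcond
            · split
              · simpa using hrec
              · simpa using hrec
          · simpa using hrec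

theorem cnt2_snd_of_none : ∀ {l : List Char}, aliceWinsStep 'B' l = none →
    (aliceWinsCnt2 l).2 = 0 := by
  intro l
  induction l with
  | nil => intro _; simp [aliceWinsCnt2]
  | cons x t ih =>
    cases t with
    | nil => intro _; simp [aliceWinsCnt2]
    | cons y t2 =>
      cases t2 with
      | nil => intro _; simp [aliceWinsCnt2]
      | cons z r =>
        intro h
        simp only [aliceWinsStep] at h
        split at h
        · exact absurd h (by simp)
        · rename_i hcond
          simp only [Option.map_eq_none_iff] at h
          have hrec := ih h
          simp only [aliceWinsCnt2]
          split
          · rename_i hxy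
            obtain ⟨h1, h2⟩ := hxy
            split
            · simpa using hrec
            · split
              · rename_i hx
                exact absurd ⟨hx, h1 ▸ hx, h2 ▸ h1 ▸ hx⟩ hcond
              · simpa using hrec
          · simpa using hrec

-- A successful step decomposes the list around the removed triple.
theorem step_decomp {c : Char} : ∀ {l l' : List Char}, aliceWinsStep c l = some l' →
    ∃ u v, l = u ++ c :: c :: c :: v ∧ l' = u ++ c :: c :: v := by
  intro l
  induction l with
  | nil => intro l' h; simp [aliceWinsStep] at h
  | cons x t ih =>
    cases t with
    | nil => intro l' h; simp [aliceWinsStep] at h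
    | cons y t2 =>
      cases t2 with
      | nil => intro l' h; simp [aliceWinsStep] at h
      | cons z r =>
        intro l' h
        simp only [aliceWinsStep] at h
        split at h
        · rename_i hcond
          obtain ⟨h1, h2, h3⟩ := hcond
          cases h
          exact ⟨[], r, by simp [h1, h2, h3], by simp [h1, h3]⟩
        · simp only [Option.map_eq_some_iff] at h
          obtain ⟨m, hm, rfl⟩ := h
          obtain ⟨u, v, hl, hm'⟩ := ih hm
          exact ⟨x :: u, v, by simp [hl], by simp [hm']⟩

-- Removing the middle of an 'A' triple lowers the A-counter by one, keeps the B-counter.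
theorem cnt2_dropA : ∀ (u v : List Char),
    aliceWinsCnt2 (u ++ 'A' :: 'A' :: 'A' :: v)
      = ((aliceWinsCnt2 (u ++ 'A' :: 'A' :: v)).1 + 1, (aliceWinsCnt2 (u ++ 'A' :: 'A' :: v)).2) := by
  intro u
  induction u with
  | nil => intro v; simp [aliceWinsCnt2]
  | cons x u2 ih =>
    intro v
    match u2 with
    | [] =>
      have h := ih v
      simp only [List.cons_append] at h ⊢
      simp [aliceWinsCnt2]
      split_ifs <;> simp
    | [y] =>
      have h := ih v
      simp only [List.cons_append] at h ⊢
      simp [aliceWinsCnt2]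
      split_ifs <;> simp
    | y :: z :: u4 =>
      have h := ih v
      simp only [List.cons_append] at h ⊢
      simp [aliceWinsCnt2, h]
      split_ifs <;> simp

theorem cnt2_dropB : ∀ (u v : List Char),
    aliceWinsCnt2 (u ++ 'B' :: 'B' :: 'B' :: v)
      = ((aliceWinsCnt2 (u ++ 'B' :: 'B' :: v)).1, (aliceWinsCnt2 (u ++ 'B' :: 'B' :: v)).2 + 1) := by
  intro u
  induction u with
  | nil => intro v; simp [aliceWinsCnt2]
  | cons x u2 ih =>
    intro v
    match u2 with
    | [] =>
      have h := ih v
      simp only [List.cons_append] at h ⊢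
      simp [aliceWinsCnt2]
      split_ifs <;> simp
    | [y] =>
      have h := ih v
      simp only [List.cons_append] at h ⊢
      simp [aliceWinsCnt2]
      split_ifs <;> simp
    | y :: z :: u4 =>
      have h := ih v
      simp only [List.cons_append] at h ⊢
      simp [aliceWinsCnt2, h]
      split_ifs <;> simp

theorem aliceWinsRun_eq : ∀ (turn : Bool) (l : List Char),
    aliceWinsRun turn l =
      if turn then decide ((aliceWinsCnt2 l).2 < (aliceWinsCnt2 l).1)
      else decide ((aliceWinsCnt2 l).2 ≤ (aliceWinsCnt2 l).1) := by
  intro turn l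
  induction turn, l using aliceWinsRun.induct with
  | case1 turn l l' hstep ih =>
    simp only [dite_eq_ite] at hstep
    rw [aliceWinsRun.eq_def]
    split
    case h_2 heq => rw [hstep] at heq; cases heq
    case h_1 x heq =>
      rw [hstep] at heq
      injection heq with heq
      subst heq
      cases turn with
      | true =>
        obtain ⟨u, v, rfl, rfl⟩ := step_decomp (c := 'A') (by simpa using hstep)
        rw [cnt2_dropA]
        simp only [Bool.not_true, if_neg Bool.false_ne_true] at ih ⊢
        rw [ih]
        simp only [if_pos trivial, decide_eq_decide]
        omega
      | false =>
        obtain ⟨u, v, rfl, rfl⟩ := step_decomp (c := 'B') (by simpa using hstep)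
        rw [cnt2_dropB]
        simp only [Bool.not_false, if_neg Bool.false_ne_true] at ih ⊢
        rw [ih]
        simp only [if_pos trivial, decide_eq_decide]
        omega
  | case2 turn l hstep =>
    simp only [dite_eq_ite] at hstep
    rw [aliceWinsRun.eq_def]
    split
    case h_1 x heq => rw [hstep] at heq; cases heq
    case h_2 heq =>
      cases turn with
      | true =>
        have h0 := cnt2_fst_of_none (l := l) (by simpa using hstep)
        simp [h0]
      | false =>
        have h0 := cnt2_snd_of_none (l := l) (by simpa using hstep)
        simp [h0]

-- ===== VERDICT (by name: the statement is the Claim_ definition above) =====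
theorem aliceWins_spec : Claim_equal_aliceWins := by
  intro colors _
  unfold Spec_aliceWins aliceWins aliceWins_alt
  rw [aliceWinsRun_eq]
  simp
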